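-- pv_equiv track=rewrite | github.com/gsc2001/Gazed | src/utils.py | generate_shot_names
-- ===== SOURCE A (Python) =====
-- def generate_shot_names(actors):
--     shot_names = []
--     for i in range(1, 2 ** len(actors)):
--         shot_name = ""
--         for j in range(len(actors)):
--             if i & (1 << j):
--                 shot_name += actors[j]
--                 shot_name += "-"
--
--         if shot_name.count("-") > 1:
--             shot_name += "fs"
--         else:
--             shot_name += "ms"
--
--         shot_names.append(shot_name)
--     return shot_names
-- ===== SOURCE B (Python) =====
-- def generate_shot_names(actors):
--     # build all subsets by iterative doubling (binary-counting order)
--     subsets = [[]]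
--     for actor in actors:
--         subsets += [s + [actor] for s in subsets]
--     shot_names = []
--     for sel in subsets[1:]:
--         name = "-".join(sel) + "-"
--         shot_names.append(name + "fs" if name.count("-") > 1 else name + "ms")
--     return shot_names
-- ===== Notes on version B (the rewrite author's own statement) =====
-- stated objective: alternative
-- what changed: B enumerates the non-empty subsets by iteratively doubling a maintained subset list (subsets += [s+[actor] for s in subsets]) and joins each subset with '-', instead of A's counting over bitmasks 1..2**n-1 with an inner bit-testing loop over actor indices.
import Mathlib
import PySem

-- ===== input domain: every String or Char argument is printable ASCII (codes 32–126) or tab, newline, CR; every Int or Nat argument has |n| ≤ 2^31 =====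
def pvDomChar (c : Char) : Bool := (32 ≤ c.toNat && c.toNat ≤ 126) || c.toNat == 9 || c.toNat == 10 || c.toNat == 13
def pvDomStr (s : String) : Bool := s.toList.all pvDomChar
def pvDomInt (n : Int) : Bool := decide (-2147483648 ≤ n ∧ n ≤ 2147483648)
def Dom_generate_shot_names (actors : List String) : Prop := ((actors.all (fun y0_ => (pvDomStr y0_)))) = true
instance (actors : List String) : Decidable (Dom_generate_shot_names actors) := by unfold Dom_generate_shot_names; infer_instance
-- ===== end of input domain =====

-- B enumerates the non-empty subsets by iterative doubling of a subset list instead of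
-- A's bitmask counter with an inner bit-testing loop over indices (objective: alternative).

-- ===== PORT A =====
-- literal port of A: outer loop over masks 1 .. 2^n-1, inner loop over j testing bit j
-- (j from range(len(actors)) is nonnegative, so j.toNat is exact for Python's 1 << j)
def generate_shot_names (actors : List String) : List String :=
  (PySem.List.pyRange 1 ((2 : Int) ^ actors.length) 1).foldl
    (fun shot_names i =>
      let shot_name : String :=
        (PySem.List.pyRange 0 (actors.length : Int) 1).foldl
          (fun shot_name j =>
            if PySem.Int.band i ((1 : Int) <<< j.toNat) ≠ 0 then
              shot_name ++ PySem.List.pyGetD actors j "" ++ "-"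
            else shot_name) ""
      let shot_name :=
        if PySem.Str.count shot_name "-" > 1 then shot_name ++ "fs" else shot_name ++ "ms"
      shot_names ++ [shot_name]) []

-- ===== PORT B =====
-- literal port of Source B: subsets grown by doubling, then one pass over subsets[1:]
def generate_shot_names_alt (actors : List String) : List String :=
  let subsets :=
    actors.foldl (fun subsets actor => subsets ++ subsets.map (fun s => s ++ [actor]))
      [([] : List String)]
  (PySem.List.slice subsets (some 1) none).foldl
    (fun shot_names sel =>
      let name := PySem.Str.join "-" sel ++ "-"
      shot_names ++ [if PySem.Str.count name "-" > 1 then name ++ "fs" else name ++ "ms"]) []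

-- ===== PRECONDITION & SPEC =====
def Spec_generate_shot_names (actors : List String) (out : List String) : Prop := out = generate_shot_names_alt actors
instance (actors : List String) (out : List String) : Decidable (Spec_generate_shot_names actors out) := by unfold Spec_generate_shot_names; infer_instance

-- ===== CLAIM (what is proved, stated in full; the proofs are below) =====
def Claim_equal_generate_shot_names : Prop := ∀ (actors : List String), Dom_generate_shot_names actors → Spec_generate_shot_names actors (generate_shot_names actors)

-- ===== LEMMAS AND PROOFS =====

-- the subset of `as` selected by the bits of k at positions j, j+1, …
def pvSelAux (as : List String) (k : Nat) (j : Nat) : List String :=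
  match as with
  | [] => []
  | a :: rest => (if k.testBit j then [a] else []) ++ pvSelAux rest k (j + 1)

-- the string A's inner loop builds for a given subset
def pvPieces : List String → String
  | [] => ""
  | a :: rest => a ++ "-" ++ pvPieces rest

-- the suffix tagging both programs share
def pvTag (name : String) : String :=
  if PySem.Str.count name "-" > 1 then name ++ "fs" else name ++ "ms"

theorem pvStr_ext {s t : String} (h : s.toList = t.toList) : s = t :=
  String.toList_inj.mp h

theorem pvPieces_append (l : List String) (a : String) :
    pvPieces (l ++ [a]) = pvPieces l ++ a ++ "-" := by
  induction l with
  | nil => apply pvStr_ext; simp [pvPieces]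
  | cons b rest ih => apply pvStr_ext; simp [pvPieces, ih]

theorem pvSelAux_append (as : List String) (a : String) (k j : Nat) :
    pvSelAux (as ++ [a]) k j
      = pvSelAux as k j ++ (if k.testBit (j + as.length) then [a] else []) := by
  induction as generalizing j with
  | nil => simp [pvSelAux]
  | cons b rest ih =>
      simp only [List.cons_append, pvSelAux, ih (j + 1), List.length_cons]
      have : j + 1 + rest.length = j + (rest.length + 1) := by omega
      rw [this, List.append_assoc]
      rfl

theorem pvSelAux_congr (as : List String) (k k' j : Nat)
    (h : ∀ i, j ≤ i → i < j + as.length → k.testBit i = k'.testBit i) :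
    pvSelAux as k j = pvSelAux as k' j := by
  induction as generalizing j with
  | nil => simp [pvSelAux]
  | cons b rest ih =>
      simp only [pvSelAux]
      rw [h j (le_refl j) (by simp), ih (j + 1) (fun i h1 h2 => h i (by omega) (by simp at h2 ⊢; omega))]

theorem pvSelAux_ne_nil (as : List String) (k j : Nat)
    (h : ∃ i, i < as.length ∧ k.testBit (j + i) = true) :
    pvSelAux as k j ≠ [] := by
  induction as generalizing j with
  | nil => obtain ⟨i, hi, _⟩ := h; simp at hi
  | cons b rest ih =>
      obtain ⟨i, hi, hb⟩ := h
      simp only [pvSelAux]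
      rcases i with _ | i
      · simp at hb; simp [hb]
      · exact List.append_ne_nil_of_right_ne_nil _
          (ih (j + 1) ⟨i, by simp at hi; omega, by rw [show j + 1 + i = j + (i+1) by omega]; exact hb⟩)
  
theorem pvGuard (k j : Nat) :
    (PySem.Int.band (k : Int) ((1 : Int) <<< (j : Int)) ≠ 0) ↔ k.testBit j = true := by
  rw [Int.one_shiftLeft j, PySem.Int.band_natCast]
  rw [ne_eq, Int.natCast_eq_zero, Nat.and_two_pow]
  rcases h : k.testBit j <;> simp [Nat.pow_eq_zero]

-- A's inner loop on a Nat-level index list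
theorem pvInnerNat_eq (as : List String) (k : Nat) :
    (List.range as.length).foldl
      (fun shot_name j =>
        if k.testBit j then shot_name ++ as.getD j "" ++ "-" else shot_name) ""
      = pvPieces (pvSelAux as k 0) := by
  induction as using List.reverseRecOn with
  | nil => simp [pvSelAux, pvPieces]
  | append_singleton as a ih =>
      rw [List.length_append, List.length_singleton, List.range_succ, List.foldl_append]
      rw [PySem.List.foldl_congr_mem (List.range as.length) _
            (fun shot_name j => if k.testBit j then shot_name ++ as.getD j "" ++ "-" else shot_name) ""
            (by
              intro acc j hj
              rw [List.mem_range] at hj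
              rw [List.getD_append as [a] "" j hj]),
          ih, pvSelAux_append, Nat.zero_add]
      rcases h : k.testBit as.length with _ | _
      · simp [h]
      · simp [h, pvPieces_append]

-- A's inner loop computes pvPieces of the selected subset
theorem pvInner_eq (as : List String) (k : Nat) :
    (PySem.List.pyRange 0 (as.length : Int) 1).foldl
      (fun shot_name j =>
        if PySem.Int.band (k : Int) ((1 : Int) <<< j.toNat) ≠ 0 then
          shot_name ++ PySem.List.pyGetD as j "" ++ "-"
        else shot_name) ""
      = pvPieces (pvSelAux as k 0) := by
  rw [PySem.List.pyRange_zero_nat, List.foldl_map]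
  rw [← pvInnerNat_eq as k]
  apply PySem.List.foldl_congr_mem
  intro acc j hj
  simp only [Int.toNat_natCast, PySem.List.pyGetD_natCast]
  by_cases h : k.testBit j
  · rw [if_pos ((pvGuard k j).mpr h), if_pos h]
  · rw [if_neg (fun hc => h ((pvGuard k j).mp hc)), if_neg h]

-- the doubling fold enumerates exactly the subsets of masks 0 .. 2^n-1
theorem pvSubsets_eq (as : List String) :
    as.foldl (fun subsets actor => subsets ++ subsets.map (fun s => s ++ [actor]))
      [([] : List String)]
      = (List.range (2 ^ as.length)).map (fun k => pvSelAux as k 0) := by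
  induction as using List.reverseRecOn with
  | nil => simp [pvSelAux]
  | append_singleton as a ih =>
      rw [List.foldl_append, List.foldl_cons, List.foldl_nil, ih]
      rw [List.length_append, List.length_singleton, pow_succ, mul_two, List.range_add]
      rw [List.map_append, List.map_map, List.map_map]
      congr 1
      · apply List.map_congr_left
        intro k hk
        rw [List.mem_range] at hk
        rw [pvSelAux_append, Nat.zero_add, Nat.testBit_lt_two_pow hk]
        simp
      · apply List.map_congr_left
        intro k hk
        rw [List.mem_range] at hk
        simp only [Function.comp]
        rw [pvSelAux_append, Nat.zero_add, Nat.testBit_two_pow_add_eq,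
            Nat.testBit_lt_two_pow hk,
            pvSelAux_congr as (2 ^ as.length + k) k 0
              (fun i _ hi => Nat.testBit_two_pow_add_gt (by simpa using hi) k)]
        simp

-- joining a non-empty subset with '-' and appending '-' is pvPieces
theorem pvJoin_eq (sel : List String) (h : sel ≠ []) :
    PySem.Str.join "-" sel ++ "-" = pvPieces sel := by
  match sel with
  | [a] =>
      apply pvStr_ext
      simp [PySem.Str.toList_join, PySem.Chars.join_singleton, pvPieces]
  | a :: b :: rest =>
      apply pvStr_ext
      have ihl := congrArg String.toList (pvJoin_eq (b :: rest) (by simp))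
      simp only [String.toList_append, PySem.Str.toList_join, List.map_cons] at ihl
      simp only [pvPieces, String.toList_append, PySem.Str.toList_join, List.map_cons,
        PySem.Chars.join_cons_cons]
      rw [List.append_assoc, List.append_assoc, ihl]
      simp [pvPieces, List.append_assoc]

theorem pvFoldMap {α : Type} (l : List α) (f : α → String) :
    l.foldl (fun acc x => acc ++ [f x]) [] = l.map f := by
  simpa using PySem.List.foldl_append_singleton_eq_map f l []

theorem pvMain (actors : List String) :
    generate_shot_names actors = generate_shot_names_alt actors := by
  have hA : generate_shot_names actors
      = (PySem.List.pyRange 1 ((2 : Int) ^ actors.length) 1).map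
          (fun i => pvTag ((PySem.List.pyRange 0 (actors.length : Int) 1).foldl
            (fun shot_name j =>
              if PySem.Int.band i ((1 : Int) <<< j.toNat) ≠ 0 then
                shot_name ++ PySem.List.pyGetD actors j "" ++ "-"
              else shot_name) "")) :=
    pvFoldMap _ _
  have hB : generate_shot_names_alt actors
      = (PySem.List.slice
          (actors.foldl (fun subsets actor => subsets ++ subsets.map (fun s => s ++ [actor]))
            [([] : List String)]) (some 1) none).map
          (fun sel => pvTag (PySem.Str.join "-" sel ++ "-")) :=
    pvFoldMap _ _
  rw [hA, hB, PySem.List.slice_from _ (by norm_num), pvSubsets_eq]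
  have hpow : 2 ^ actors.length = (2 ^ actors.length - 1) + 1 :=
    (Nat.succ_pred_eq_of_pos (Nat.two_pow_pos _)).symm
  have hcast : ((2 : Int) ^ actors.length) = (((2 ^ actors.length : Nat)) : Int) := by
    push_cast; ring
  have hdrop : (List.range (2 ^ actors.length)).drop (Int.toNat 1)
      = (List.range (2 ^ actors.length - 1)).map (fun k => k + 1) := by
    rw [hpow, List.range_succ_eq_map]
    simp [Nat.add_comm]
  have hlen : ((((2 ^ actors.length : Nat)) : Int) - 1).toNat = 2 ^ actors.length - 1 := by
    omega
  rw [hcast, PySem.List.pyRange_one 1 _, hlen]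
  conv_rhs => rw [← List.map_drop, hdrop, List.map_map, List.map_map]
  conv_lhs => rw [List.map_map]
  apply List.map_congr_left
  intro k hk
  rw [List.mem_range] at hk
  have hik : (1 : Int) + (k : Int) = ((k + 1 : Nat) : Int) := by push_cast; ring
  simp only [Function.comp, hik]
  rw [pvInner_eq actors (k + 1)]
  have hne : pvSelAux actors (k + 1) 0 ≠ [] := by
    obtain ⟨j, hj⟩ := Nat.exists_testBit_of_ne_zero (Nat.succ_ne_zero k)
    refine pvSelAux_ne_nil actors (k + 1) 0 ⟨j, ?_, by simpa using hj⟩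
    have h1 : 2 ^ j ≤ k + 1 := Nat.ge_two_pow_of_testBit hj
    have h2 : k + 1 < 2 ^ actors.length := by omega
    exact (Nat.pow_lt_pow_iff_right (by norm_num)).mp (Nat.lt_of_le_of_lt h1 h2)
  rw [pvJoin_eq _ hne]

-- ===== VERDICT (by name: the statement is the Claim_ definition above) =====
theorem generate_shot_names_spec : Claim_equal_generate_shot_names := by
  intro actors _
  exact pvMain actors
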